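-- pv_equiv track=rewrite | github.com/1r0nw1ll/quantum-arithmetic-research | qa_hensel_selforg_experiment.py | orbit_family_id
-- ===== SOURCE A (Python) =====
-- def qa_step(bi, ei, m):
--     """A1-compliant QA step: states in {1,...,m}."""
--     b_new = ((bi + ei - 1) % m) + 1
--     e_new = ((ei + b_new - 1) % m) + 1
--     return b_new, e_new
--
-- def orbit_family_id(bi, ei, m):
--     """
--     Return a canonical orbit family identifier.
--     Two (b,e) pairs are in the same family if they lie on the same cycle.
--     """
--     visited = set()
--     state = (bi, ei)
--     for _ in range(m * m + 1):
--         if state in visited: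
--             # Return the lexicographically smallest state in the cycle
--             cycle_start = state
--             cycle = [cycle_start]
--             s = qa_step(cycle_start[0], cycle_start[1], m)
--             while s != cycle_start:
--                 cycle.append(s)
--                 s = qa_step(s[0], s[1], m)
--             return min(cycle)  # canonical representative
--         visited.add(state)
--         state = qa_step(state[0], state[1], m)
--     return (bi, ei)
-- ===== SOURCE B (Python) =====
-- def qa_step(bi, ei, m):
--     """A1-compliant QA step: states in {1,...,m}."""
--     b_new = ((bi + ei - 1) % m) + 1
--     e_new = ((ei + b_new - 1) % m) + 1
--     return b_new, e_new
--
-- def orbit_family_id(bi, ei, m):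
--     """Single-pass variant: record the walk in order; at the first revisit the
--     cycle is exactly the recorded suffix from that state's first position."""
--     seen = []
--     pos = {}
--     state = (bi, ei)
--     for _ in range(m * m + 1):
--         if state in pos:
--             return min(seen[pos[state]:])
--         pos[state] = len(seen)
--         seen.append(state)
--         state = qa_step(state[0], state[1], m)
--     return (bi, ei)
-- ===== Notes on version B (the rewrite author's own statement) =====
-- stated objective: simpler
-- what changed: B folds A's two traversals into one pass: it records the walk in an ordered list `seen` with a dict `pos` of first positions, and at the first revisit returns min(seen[pos[state]:]) directly, eliminating A's second while-loop that re-walks the cycle (measured ~1.6x on long orbits).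
import Mathlib
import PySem

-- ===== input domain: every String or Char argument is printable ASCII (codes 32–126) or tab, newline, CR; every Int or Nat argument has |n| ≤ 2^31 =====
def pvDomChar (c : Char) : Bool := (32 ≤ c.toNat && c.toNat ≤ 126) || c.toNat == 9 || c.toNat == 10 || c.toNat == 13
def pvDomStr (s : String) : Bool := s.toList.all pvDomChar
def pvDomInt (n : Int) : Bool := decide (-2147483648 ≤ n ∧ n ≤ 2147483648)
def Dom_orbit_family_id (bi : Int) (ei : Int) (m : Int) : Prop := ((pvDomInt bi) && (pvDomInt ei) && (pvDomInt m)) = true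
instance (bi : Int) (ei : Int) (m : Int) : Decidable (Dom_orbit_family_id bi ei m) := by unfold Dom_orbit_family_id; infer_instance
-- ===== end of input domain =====

-- B replaces A's two traversals (walk, then re-walk the cycle for its min) by one recorded pass; objective: simpler.
-- Container note: Python's set/dict here are used only for membership/first-position lookup of states, never
-- iterated, so the ports carry them as Std.HashSet/Std.HashMap (same membership/overwrite semantics, evaluable);
-- the grown lists are accumulated reversed and reversed once at the end (Python's O(1) append).

-- ===== PORT A =====
-- shared module helper qa_step
def qaStep (bi : Int) (ei : Int) (m : Int) : Int × Int :=
  let b_new := PySem.Int.mod (bi + ei - 1) m + 1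
  let e_new := PySem.Int.mod (ei + b_new - 1) m + 1
  (b_new, e_new)

-- A's inner `while s != cycle_start` loop (cycle accumulated reversed; fuel only to be total, always sufficient)
def walkCycle (m : Int) (start : Int × Int) : Nat → List (Int × Int) → (Int × Int) → List (Int × Int)
  | 0, revCycle, _ => revCycle.reverse
  | f+1, revCycle, s =>
      if s = start then revCycle.reverse
      else walkCycle m start f (s :: revCycle) (qaStep s.1 s.2 m)

-- A's `for _ in range(m*m+1)` loop
def aLoop (m : Int) (bi : Int) (ei : Int) : Nat → Std.HashSet (Int × Int) → (Int × Int) → Int × Int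
  | 0, _, _ => (bi, ei)
  | n+1, visited, state =>
      if visited.contains state then
        let cycle := walkCycle m state ((m * m + 1).toNat) [state] (qaStep state.1 state.2 m)
        (PySem.List.min2? cycle Prod.fst Prod.snd).getD (bi, ei)   -- min(cycle); cycle is never empty
      else aLoop m bi ei n (visited.insert state) (qaStep state.1 state.2 m)

def orbit_family_id (bi : Int) (ei : Int) (m : Int) : Int × Int :=
  aLoop m bi ei ((m * m + 1).toNat) (∅ : Std.HashSet (Int × Int)) (bi, ei)

-- ===== PORT B =====
def bLoop (m : Int) (bi : Int) (ei : Int) :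
    Nat → Std.HashMap (Int × Int) Int → List (Int × Int) → (Int × Int) → Int × Int
  | 0, _, _, _ => (bi, ei)
  | n+1, pos, revSeen, state =>
      match pos[state]? with
      | some start =>
          (PySem.List.min2? (PySem.List.slice revSeen.reverse (some start) none) Prod.fst Prod.snd).getD (bi, ei)
      | none =>
          bLoop m bi ei n (pos.insert state (revSeen.length : Int))
            (state :: revSeen) (qaStep state.1 state.2 m)

def orbit_family_id_alt (bi : Int) (ei : Int) (m : Int) : Int × Int :=
  bLoop m bi ei ((m * m + 1).toNat) (∅ : Std.HashMap (Int × Int) Int) [] (bi, ei)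

-- ===== PRECONDITION & SPEC =====
-- Pre_ excludes only m = 0, on which Python's `%` raises ZeroDivisionError in both A and B.
def Pre_orbit_family_id (bi : Int) (ei : Int) (m : Int) : Prop := m ≠ 0
instance (bi : Int) (ei : Int) (m : Int) : Decidable (Pre_orbit_family_id bi ei m) := by unfold Pre_orbit_family_id; infer_instance
def pvWitness_orbit_family_id : Int × Int × Int := (3, 5, 7)

def Spec_orbit_family_id (bi : Int) (ei : Int) (m : Int) (out : Int × Int) : Prop := out = orbit_family_id_alt bi ei m
instance (bi : Int) (ei : Int) (m : Int) (out : Int × Int) : Decidable (Spec_orbit_family_id bi ei m out) := by unfold Spec_orbit_family_id; infer_instance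

-- ===== CLAIM (what is proved, stated in full; the proofs are below) =====
def Claim_equal_orbit_family_id : Prop := ∀ (bi : Int) (ei : Int) (m : Int), Dom_orbit_family_id bi ei m → Pre_orbit_family_id bi ei m → Spec_orbit_family_id bi ei m (orbit_family_id bi ei m)

-- ===== LEMMAS AND PROOFS =====

-- trajectory of the QA walk
def pvTraj (bi : Int) (ei : Int) (m : Int) : Nat → Int × Int
  | 0 => (bi, ei)
  | n+1 => qaStep (pvTraj bi ei m n).1 (pvTraj bi ei m n).2 m

-- the states recorded after k loop iterations, in order
def seenL (bi ei m : Int) (k : Nat) : List (Int × Int) :=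
  (List.range k).map (pvTraj bi ei m)

-- spec of the position map after k (fresh-key) insertions: last matching index
def posSpec (bi ei m : Int) : Nat → (Int × Int) → Option Int
  | 0, _ => none
  | k+1, x => if x = pvTraj bi ei m k then some (k : Int) else posSpec bi ei m k x

lemma seenL_succ (bi ei m : Int) (k : Nat) :
    seenL bi ei m (k+1) = seenL bi ei m k ++ [pvTraj bi ei m k] := by
  simp [seenL, List.range_succ]

lemma posSpec_mem (bi ei m : Int) (k j : Nat) (hj : j < k)
    (hinj : ∀ a b, a < b → b < k → pvTraj bi ei m a ≠ pvTraj bi ei m b) :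
    posSpec bi ei m k (pvTraj bi ei m j) = some (j : Int) := by
  induction k with
  | zero => omega
  | succ k ih =>
    rw [posSpec]
    rcases Nat.lt_succ_iff_lt_or_eq.mp hj with h | h
    · rw [if_neg (fun he => hinj j k h (Nat.lt_succ_self k) he)]
      exact ih h (fun a b hab hbk => hinj a b hab (Nat.lt_succ_of_lt hbk))
    · subst h
      rw [if_pos rfl]

lemma posSpec_notmem (bi ei m : Int) (k : Nat) (x : Int × Int)
    (hx : x ∉ seenL bi ei m k) :
    posSpec bi ei m k x = none := by
  induction k with
  | zero => rfl
  | succ k ih =>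
    rw [seenL_succ] at hx
    simp only [List.mem_append, List.mem_singleton, not_or] at hx
    rw [posSpec, if_neg hx.2]
    exact ih hx.1

lemma drop_range (m n : Nat) : (List.range n).drop m = List.range' m (n - m) := by
  apply List.ext_getElem
  · simp
  · intro i h1 h2
    simp

lemma walk_eq (bi ei m : Int) (i k : Nat) (hik : i < k)
    (hk : pvTraj bi ei m i = pvTraj bi ei m k)
    (hinj : ∀ a b, a < b → b < k → pvTraj bi ei m a ≠ pvTraj bi ei m b) :
    ∀ (f j : Nat) (acc : List (Int × Int)), i < j → j ≤ k → k - j ≤ f →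
      walkCycle m (pvTraj bi ei m k) f acc (pvTraj bi ei m j)
        = acc.reverse ++ (List.range' j (k - j)).map (pvTraj bi ei m) := by
  intro f
  induction f with
  | zero =>
    intro j acc hij hjk hf
    have : j = k := by omega
    subst this
    simp [walkCycle]
  | succ f ih =>
    intro j acc hij hjk hf
    by_cases hj : j = k
    · subst hj
      simp [walkCycle]
    · have hjk' : j < k := lt_of_le_of_ne hjk hj
      have hne : pvTraj bi ei m j ≠ pvTraj bi ei m k := by
        intro he
        exact hinj i j hij hjk' (hk.trans he.symm)
      have hstep : qaStep (pvTraj bi ei m j).1 (pvTraj bi ei m j).2 m = pvTraj bi ei m (j+1) := rfl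
      rw [walkCycle, if_neg hne, hstep,
        ih (j+1) (pvTraj bi ei m j :: acc) (Nat.lt_succ_of_lt hij) hjk' (by omega)]
      have hr : k - j = (k - (j+1)) + 1 := by omega
      rw [hr, List.range'_succ]
      simp

lemma loop_eq (bi ei m : Int) :
    ∀ (n k : Nat) (visited : Std.HashSet (Int × Int)) (pos : Std.HashMap (Int × Int) Int),
    n + k = (m * m + 1).toNat →
    (∀ a b, a < b → b < k → pvTraj bi ei m a ≠ pvTraj bi ei m b) →
    (∀ x, visited.contains x = true ↔ x ∈ seenL bi ei m k) →
    (∀ x, pos[x]? = posSpec bi ei m k x) →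
    aLoop m bi ei n visited (pvTraj bi ei m k)
      = bLoop m bi ei n pos ((seenL bi ei m k).reverse) (pvTraj bi ei m k) := by
  intro n
  induction n with
  | zero => intro k visited pos _ _ _ _; simp [aLoop, bLoop]
  | succ n ih =>
    intro k visited pos hnk hinj hv hp
    by_cases hmem : pvTraj bi ei m k ∈ seenL bi ei m k
    · -- revisit: both return min over the same cycle list
      simp only [seenL, List.mem_map, List.mem_range] at hmem
      obtain ⟨i, hik, hi⟩ := hmem
      have hcontains : visited.contains (pvTraj bi ei m k) = true := by
        rw [hv, ← hi]
        simp only [seenL, List.mem_map, List.mem_range]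
        exact ⟨i, hik, rfl⟩
      have hget : pos[pvTraj bi ei m k]? = some (i : Int) := by
        rw [hp, ← hi]
        exact posSpec_mem bi ei m k i hik hinj
      have hstep : qaStep (pvTraj bi ei m k).1 (pvTraj bi ei m k).2 m = pvTraj bi ei m (i+1) := by
        rw [← hi]
        rfl
      have hwalk := walk_eq bi ei m i k hik hi hinj ((m * m + 1).toNat) (i+1)
        [pvTraj bi ei m k] (Nat.lt_succ_self i) hik (by omega)
      have hslice : PySem.List.slice (seenL bi ei m k) (some (i : Int)) none
          = (seenL bi ei m k).drop i := PySem.List.slice_from_natCast _ i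
      have hdrop : (seenL bi ei m k).drop i
          = (List.range' i (k - i)).map (pvTraj bi ei m) := by
        rw [seenL, ← List.map_drop, drop_range]
      have hki : k - i = (k - (i+1)) + 1 := by omega
      rw [aLoop, bLoop, hget, if_pos hcontains, hstep, hwalk, List.reverse_reverse]
      simp only [hslice, hdrop, hki, List.range'_succ, List.map_cons]
      simp [hi]
    · -- fresh state: both record it and step
      have hcontains : visited.contains (pvTraj bi ei m k) = false := by
        rw [Bool.eq_false_iff]
        intro h
        exact hmem ((hv _).mp h)
      have hget : pos[pvTraj bi ei m k]? = none := by
        rw [hp]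
        exact posSpec_notmem bi ei m k _ hmem
      have hlen : (((seenL bi ei m k).reverse).length : Int) = (k : Int) := by simp [seenL]
      have hstep : qaStep (pvTraj bi ei m k).1 (pvTraj bi ei m k).2 m = pvTraj bi ei m (k+1) := rfl
      have hrev : pvTraj bi ei m k :: (seenL bi ei m k).reverse = (seenL bi ei m (k+1)).reverse := by
        rw [seenL_succ]
        simp
      rw [aLoop, bLoop, hget, hcontains]
      simp only [Bool.false_eq_true, if_false]
      rw [hlen, hstep, hrev]
      apply ih (k+1) _ _ (by omega)
      · -- injectivity extended to k+1
        intro a b hab hbk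
        rcases Nat.lt_succ_iff_lt_or_eq.mp hbk with h | h
        · exact hinj a b hab h
        · subst h
          intro he
          apply hmem
          rw [← he]
          simp only [seenL, List.mem_map, List.mem_range]
          exact ⟨a, hab, rfl⟩
      · -- visited invariant
        intro x
        rw [Std.HashSet.contains_insert, seenL_succ]
        simp only [List.mem_append, List.mem_singleton, Bool.or_eq_true, beq_iff_eq]
        rw [hv]
        tauto
      · -- pos invariant
        intro x
        rw [Std.HashMap.getElem?_insert, posSpec]
        by_cases hx : x = pvTraj bi ei m k
        · simp [hx]
        · simp [beq_iff_eq, hx, Ne.symm hx, hp]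

-- ===== VERDICT (by name: the statement is the Claim_ definition above) =====
theorem orbit_family_id_spec : Claim_equal_orbit_family_id := by
  intro bi ei m _ _
  unfold Spec_orbit_family_id orbit_family_id orbit_family_id_alt
  have h0 : pvTraj bi ei m 0 = (bi, ei) := rfl
  have := loop_eq bi ei m ((m * m + 1).toNat) 0
    (∅ : Std.HashSet (Int × Int)) (∅ : Std.HashMap (Int × Int) Int)
    (by omega) (by omega)
    (by intro x; simp [seenL])
    (by intro x; simp [posSpec])
  simpa [seenL, h0] using this
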